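-- pv_equiv track=rewrite | github.com/nyroro/codeforces | CF2082B.py | gaomin
-- ===== SOURCE A (Python) =====
-- def gaomin(x,n,m):
--     while x>1 and m > 0:
--         if x % 2 == 0:
--             m-=1
--             x>>=1
--         else:
--             m-=1
--             x>>=1
--             x+=1
--     while x>0 and n>0:
--         n-=1
--         x>>=1
--     return x
-- ===== SOURCE B (Python) =====
-- def gaomin(x, n, m):
--     if x > 1 and m > 0:
--         s = min(m, x.bit_length())
--         x = (x + (1 << s) - 1) >> s  # ceil(x / 2**s); repeated ceil-halving
--     if x > 0 and n > 0:
--         t = min(n, x.bit_length())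
--         x >>= t                      # floor(x / 2**t)
--     return x
-- ===== Notes on version B (the rewrite author's own statement) =====
-- stated objective: simpler
-- what changed: Replaced both while-loops by closed-form shifts: ceil division by 2^min(m,bitlen) for the first loop and a floor shift by 2^min(n,bitlen) for the second, capping the exponents so no giant power is ever built.
import Mathlib
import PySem

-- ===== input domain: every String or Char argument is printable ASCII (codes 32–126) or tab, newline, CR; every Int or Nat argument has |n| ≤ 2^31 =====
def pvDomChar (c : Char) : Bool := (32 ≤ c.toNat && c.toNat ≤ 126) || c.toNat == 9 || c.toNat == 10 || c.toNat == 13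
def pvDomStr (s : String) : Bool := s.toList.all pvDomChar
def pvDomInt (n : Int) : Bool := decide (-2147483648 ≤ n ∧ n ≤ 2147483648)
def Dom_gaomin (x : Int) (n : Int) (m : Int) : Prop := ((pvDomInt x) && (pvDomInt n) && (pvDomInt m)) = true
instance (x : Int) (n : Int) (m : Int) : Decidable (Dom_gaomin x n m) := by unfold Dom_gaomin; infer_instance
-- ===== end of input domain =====

-- B replaces A's two while-loops by closed-form capped shifts (ceil then floor division by a power of two); same return value.

-- ===== PORT A =====
-- first while loop of A: while x>1 and m>0: halve, +1 when odd (x>>1 on a positive int is floor division by 2)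
def gaominLoop1 (x : Int) (m : Int) : Int :=
  if h : 1 < x ∧ 0 < m then
    if PySem.Int.mod x 2 = 0 then
      gaominLoop1 (PySem.Int.floordiv x 2) (m - 1)
    else
      gaominLoop1 (PySem.Int.floordiv x 2 + 1) (m - 1)
  else x
termination_by m.toNat
decreasing_by all_goals omega

-- second while loop of A: while x>0 and n>0: x >>= 1
def gaominLoop2 (x : Int) (n : Int) : Int :=
  if h : 0 < x ∧ 0 < n then
    gaominLoop2 (PySem.Int.floordiv x 2) (n - 1)
  else x
termination_by n.toNat
decreasing_by omega

def gaomin (x : Int) (n : Int) (m : Int) : Int :=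
  gaominLoop2 (gaominLoop1 x m) n

-- ===== PORT B =====
def gaomin_alt (x : Int) (n : Int) (m : Int) : Int :=
  let x1 : Int :=
    if 1 < x ∧ 0 < m then
      let s : Int := min m (PySem.Int.bitLength x : Int)
      PySem.Int.floordiv (x + 2 ^ s.toNat - 1) (2 ^ s.toNat)   -- (x + (1<<s) - 1) >> s
    else x
  if 0 < x1 ∧ 0 < n then
    let t : Int := min n (PySem.Int.bitLength x1 : Int)
    PySem.Int.floordiv x1 (2 ^ t.toNat)                        -- x1 >> t
  else x1

-- ===== PRECONDITION & SPEC =====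
def Spec_gaomin (x : Int) (n : Int) (m : Int) (out : Int) : Prop := out = gaomin_alt x n m
instance (x : Int) (n : Int) (m : Int) (out : Int) : Decidable (Spec_gaomin x n m out) := by unfold Spec_gaomin; infer_instance

-- ===== CLAIM (what is proved, stated in full; the proofs are below) =====
def Claim_equal_gaomin : Prop := ∀ (x : Int) (n : Int) (m : Int), Dom_gaomin x n m → Spec_gaomin x n m (gaomin x n m)

-- ===== LEMMAS AND PROOFS =====

-- ceiling division on Nat, the value Source B's (x + (1<<s) - 1) >> s computes
def cdiv (a b : Nat) : Nat := (a + b - 1) / b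

lemma cdiv_one (a : Nat) : cdiv a 1 = a := by simp [cdiv]

lemma cdiv_pos {a : Nat} (k : Nat) (ha : 1 ≤ a) : 1 ≤ cdiv a (2 ^ k) := by
  have hb : 0 < 2 ^ k := Nat.two_pow_pos k
  exact (Nat.one_le_div_iff hb).mpr (by omega)

lemma cdiv_eq_one {a : Nat} (k : Nat) (ha : 1 ≤ a) (hle : a ≤ 2 ^ k) : cdiv a (2 ^ k) = 1 := by
  have hb : 0 < 2 ^ k := Nat.two_pow_pos k
  exact Nat.div_eq_of_lt_le (by omega) (by omega)

lemma cdiv_compose (a k : Nat) (ha : 1 ≤ a) :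
    cdiv ((a + 1) / 2) (2 ^ k) = cdiv a (2 ^ (k + 1)) := by
  unfold cdiv
  have h1 : (a + 2 ^ (k+1) - 1) / 2 ^ (k+1) = ((a + 2 ^ (k+1) - 1) / 2) / 2 ^ k := by
    rw [Nat.div_div_eq_div_mul]; ring_nf
  have h2 : (a + 2 ^ (k+1) - 1) / 2 = (a - 1) / 2 + 2 ^ k := by
    have he : a + 2 ^ (k+1) - 1 = (a - 1) + 2 * 2 ^ k := by
      have := Nat.two_pow_pos (k+1); ring_nf; omega
    rw [he, Nat.add_mul_div_left _ _ (show 0 < 2 by norm_num)]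
  have h3 : (a + 1) / 2 + 2 ^ k - 1 = (a - 1) / 2 + 2 ^ k := by omega
  rw [h1, h2, h3]

lemma floordiv_natCast_two (a : Nat) : PySem.Int.floordiv (a : Int) 2 = ((a / 2 : Nat) : Int) := by
  exact_mod_cast PySem.Int.floordiv_natCast a 2

lemma mod_natCast_two (a : Nat) : PySem.Int.mod (a : Int) 2 = ((a % 2 : Nat) : Int) := by
  exact_mod_cast PySem.Int.mod_natCast a 2

lemma loop1_eq (k : Nat) : ∀ (m : Int) (a : Nat), m.toNat = k → 1 ≤ a →
    gaominLoop1 (a : Int) m = ((cdiv a (2 ^ k) : Nat) : Int) := by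
  induction k with
  | zero =>
    intro m a hk ha
    rw [gaominLoop1, dif_neg (by omega), pow_zero, cdiv_one]
  | succ k ih =>
    intro m a hk ha
    by_cases hx : 1 < a
    · rw [gaominLoop1, dif_pos ⟨by exact_mod_cast hx, by omega⟩]
      rw [mod_natCast_two, floordiv_natCast_two]
      by_cases he : a % 2 = 0
      · rw [if_pos (by exact_mod_cast he)]
        rw [ih (m - 1) (a / 2) (by omega) (by omega)]
        congr 1
        have : a / 2 = (a + 1) / 2 := by omega
        rw [this, cdiv_compose a k (by omega)]
      · rw [if_neg (by exact_mod_cast he)]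
        have hcast : ((a / 2 : Nat) : Int) + 1 = ((a / 2 + 1 : Nat) : Int) := by push_cast; ring
        rw [hcast, ih (m - 1) (a / 2 + 1) (by omega) (by omega)]
        congr 1
        have : a / 2 + 1 = (a + 1) / 2 := by omega
        rw [this, cdiv_compose a k (by omega)]
    · -- a = 1: the loop stops, and ceil(1 / 2^(k+1)) = 1
      have ha1 : a = 1 := by omega
      subst ha1
      rw [gaominLoop1, dif_neg (by omega)]
      rw [cdiv_eq_one (k + 1) (by omega) (by have := Nat.two_pow_pos (k+1); omega)]

lemma loop2_eq (k : Nat) : ∀ (n : Int) (a : Nat), n.toNat = k →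
    gaominLoop2 (a : Int) n = ((a / 2 ^ k : Nat) : Int) := by
  induction k with
  | zero =>
    intro n a hk
    rw [gaominLoop2, dif_neg (by omega), pow_zero, Nat.div_one]
  | succ k ih =>
    intro n a hk
    by_cases hx : 0 < a
    · rw [gaominLoop2, dif_pos ⟨by exact_mod_cast hx, by omega⟩]
      rw [floordiv_natCast_two, ih (n - 1) (a / 2) (by omega)]
      rw [Nat.div_div_eq_div_mul]
      congr 2
      ring
    · have ha0 : a = 0 := by omega
      subst ha0
      rw [gaominLoop2, dif_neg (by simp), Nat.zero_div]

-- bit length of a cast Nat bounds it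
lemma lt_two_pow_bitLength_nat (a : Nat) : a < 2 ^ PySem.Int.bitLength (a : Int) := by
  have := PySem.Int.lt_two_pow_bitLength (a : Int)
  simpa using this

-- B's first stage computes the same ceiling division as A's first loop, despite the capped exponent
lemma stage1_eq (m : Int) (a : Nat) (ha : 1 ≤ a) :
    (if 1 < (a : Int) ∧ 0 < m then
      PySem.Int.floordiv ((a : Int) + 2 ^ (min m (PySem.Int.bitLength (a : Int) : Int)).toNat - 1)
        (2 ^ (min m (PySem.Int.bitLength (a : Int) : Int)).toNat)
    else (a : Int)) = ((cdiv a (2 ^ m.toNat) : Nat) : Int) := by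
  set L : Nat := PySem.Int.bitLength (a : Int) with hL
  have haL : a < 2 ^ L := lt_two_pow_bitLength_nat a
  by_cases hg : 1 < (a : Int) ∧ 0 < m
  · rw [if_pos hg]
    set sN : Nat := (min m (L : Int)).toNat with hsN
    have hnum : ((a : Int) + 2 ^ sN - 1) = ((a + 2 ^ sN - 1 : Nat) : Int) := by
      have h2 : ((2 ^ sN : Nat) : Int) = (2 : Int) ^ sN := by push_cast; ring
      have := Nat.two_pow_pos sN
      omega
    have hden : ((2 : Int) ^ sN) = ((2 ^ sN : Nat) : Int) := by push_cast; ring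
    rw [hnum, hden, PySem.Int.floordiv_natCast]
    show (((a + 2 ^ sN - 1) / 2 ^ sN : Nat) : Int) = _
    have : (a + 2 ^ sN - 1) / 2 ^ sN = cdiv a (2 ^ sN) := rfl
    rw [this]
    congr 1
    by_cases hms : m.toNat ≤ L
    · have : sN = m.toNat := by omega
      rw [this]
    · have hsL : sN = L := by omega
      rw [hsL, cdiv_eq_one L ha haL.le,
        cdiv_eq_one m.toNat ha (le_trans haL.le (Nat.pow_le_pow_right (by norm_num) (by omega)))]
  · rw [if_neg hg]
    by_cases hm : 0 < m
    · -- then a = 1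
      have ha1 : a = 1 := by
        rcases Decidable.not_and_iff_or_not.mp hg with h | h
        · have : ¬ (1 : Int) < (a : Int) := h
          omega
        · omega
      subst ha1
      rw [cdiv_eq_one m.toNat (by omega) (by have := Nat.two_pow_pos m.toNat; omega)]
    · have : m.toNat = 0 := by omega
      rw [this, pow_zero, cdiv_one]

-- ===== VERDICT (by name: the statement is the Claim_ definition above) =====
theorem gaomin_spec : Claim_equal_gaomin := by
  intro x n m _
  show gaomin x n m = gaomin_alt x n m
  by_cases hx : 1 ≤ x
  · -- positive x: both sides equal (ceil-div then floor-div) closed forms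
    obtain ⟨a, rfl⟩ : ∃ a : Nat, x = (a : Int) := ⟨x.toNat, by omega⟩
    have ha : 1 ≤ a := by exact_mod_cast hx
    set c : Nat := cdiv a (2 ^ m.toNat) with hc
    have hcpos : 1 ≤ c := cdiv_pos m.toNat ha
    have hA : gaomin (a : Int) n m = ((c / 2 ^ n.toNat : Nat) : Int) := by
      rw [gaomin, loop1_eq m.toNat m a rfl ha, loop2_eq n.toNat n c rfl]
    rw [hA]
    show _ = gaomin_alt (a : Int) n m
    rw [gaomin_alt]
    simp only
    rw [stage1_eq m a ha]
    set L2 : Nat := PySem.Int.bitLength ((c : Nat) : Int) with hL2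
    have hcL : c < 2 ^ L2 := lt_two_pow_bitLength_nat c
    by_cases hn : 0 < n
    · rw [if_pos ⟨by exact_mod_cast hcpos, hn⟩]
      set tN : Nat := (min n (L2 : Int)).toNat with htN
      have hden : ((2 : Int) ^ tN) = ((2 ^ tN : Nat) : Int) := by push_cast; ring
      rw [hden, PySem.Int.floordiv_natCast]
      congr 1
      by_cases hns : n.toNat ≤ L2
      · have : tN = n.toNat := by omega
        rw [this]
      · have htL : tN = L2 := by omega
        rw [htL, Nat.div_eq_of_lt hcL,
          Nat.div_eq_of_lt (lt_of_lt_of_le hcL (Nat.pow_le_pow_right (by norm_num) (by omega)))]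
    · rw [if_neg (by omega)]
      have : n.toNat = 0 := by omega
      rw [this, pow_zero, Nat.div_one]
  · -- x ≤ 0 (and x ≤ 1 in general): both loops and both branches of B leave x unchanged
    have hx0 : x ≤ 0 := by omega
    have h1 : gaominLoop1 x m = x := by rw [gaominLoop1, dif_neg (by omega)]
    have h2 : gaomin x n m = x := by rw [gaomin, h1, gaominLoop2, dif_neg (by omega)]
    rw [h2, gaomin_alt]
    simp only
    rw [if_neg (by omega), if_neg (by omega)]
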